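-- pv_equiv track=rewrite | github.com/sharag/py_analis | analis_dem_01.py | sort_2_list
-- ===== SOURCE A (Python) =====
-- def sort_2_list(x_list, y_list):
--     x_out = []
--     y_out = []
--     temp = []
--     for index in range(len(x_list)):
--         temp.append([x_list[index], y_list[index]])
--     temp.sort()
--     for pos in temp:
--         x_out.append(pos[0])
--         y_out.append(pos[1])
--     return x_out, y_out
-- ===== SOURCE B (Python) =====
-- def _merge(a, b):
--     out = []
--     i = 0
--     j = 0
--     while i < len(a) and j < len(b):
--         if b[j] < a[i]:
--             out.append(b[j])
--             j += 1
--         else: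
--             out.append(a[i])
--             i += 1
--     out.extend(a[i:])
--     out.extend(b[j:])
--     return out
--
--
-- def _msort(ps):
--     if len(ps) <= 1:
--         return ps
--     mid = len(ps) // 2
--     return _merge(_msort(ps[:mid]), _msort(ps[mid:]))
--
--
-- def sort_2_list(x_list, y_list):
--     pairs = [(x_list[i], y_list[i]) for i in range(len(x_list))]
--     pairs = _msort(pairs)
--     return [p[0] for p in pairs], [p[1] for p in pairs]
-- ===== Notes on version B (the rewrite author's own statement) =====
-- stated objective: alternative
-- what changed: B replaces the built-in sort of a materialised pair list plus an unzip loop by a hand-written top-down recursive merge sort (split in half, merge two sorted runs), then projects the two output lists.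
import Mathlib
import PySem

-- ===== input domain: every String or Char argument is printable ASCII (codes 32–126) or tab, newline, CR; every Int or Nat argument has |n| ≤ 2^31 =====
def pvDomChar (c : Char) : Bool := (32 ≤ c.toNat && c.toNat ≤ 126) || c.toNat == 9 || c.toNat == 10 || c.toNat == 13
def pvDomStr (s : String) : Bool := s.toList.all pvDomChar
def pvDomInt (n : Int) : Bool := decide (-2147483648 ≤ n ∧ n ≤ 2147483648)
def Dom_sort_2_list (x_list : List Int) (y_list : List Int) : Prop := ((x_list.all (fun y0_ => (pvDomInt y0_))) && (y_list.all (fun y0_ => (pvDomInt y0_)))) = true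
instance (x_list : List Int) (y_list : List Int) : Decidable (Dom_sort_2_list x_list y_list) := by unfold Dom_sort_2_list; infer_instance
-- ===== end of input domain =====

-- B replaces A's built-in sort of a materialised pair list (plus an unzip loop) by a
-- hand-written top-down recursive merge sort, then projects the two output lists (alternative algorithm; same return value).

-- ===== PORT A =====
-- A: build temp = [[x[i], y[i]] for i in range(len(x))] (2-lists ported as pairs),
-- temp.sort() (lexicographic on pairs = sorted2 with fst/snd keys), then unzip by appending.
-- x_list[index] / y_list[index] ported with pyGetD; Pre_ guarantees the index is in range
-- (Python raises IndexError exactly when len(y_list) < len(x_list)).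
def sort_2_list (x_list : List Int) (y_list : List Int) : List Int × List Int :=
  let temp := (PySem.List.pyRange 0 (x_list.length : Int) 1).foldl
    (fun acc index => acc ++ [(PySem.List.pyGetD x_list index 0, PySem.List.pyGetD y_list index 0)]) []
  let temp2 := PySem.List.sorted2 temp Prod.fst Prod.snd
  let out := temp2.foldl (fun acc pos => (acc.1 ++ [pos.1], acc.2 ++ [pos.2])) (([] : List Int), ([] : List Int))
  out

-- ===== PORT B =====
-- b[j] < a[i] on pairs: Python's lexicographic tuple comparison, written componentwise.
def pvPairLt (p q : Int × Int) : Bool :=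
  decide (p.1 < q.1) || (decide (p.1 = q.1) && decide (p.2 < q.2))

-- _merge's while loop over indices i, j, consuming one head per step; the trailing
-- out.extend(a[i:]) / out.extend(b[j:]) are the base cases.
def pvMerge : List (Int × Int) → List (Int × Int) → List (Int × Int)
  | [], b => b
  | a, [] => a
  | x :: xs, y :: ys =>
      if pvPairLt y x then y :: pvMerge (x :: xs) ys else x :: pvMerge xs (y :: ys)

-- _msort: mid = len(ps) // 2 (nonnegative, so // is Nat division); the slices
-- ps[:mid] / ps[mid:] with 0 ≤ mid ≤ len are exactly take/drop (PySem.List.slice_to / slice_from).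
def pvMsort (l : List (Int × Int)) : List (Int × Int) :=
  if _h : l.length ≤ 1 then l
  else
    pvMerge (pvMsort (l.take (l.length / 2))) (pvMsort (l.drop (l.length / 2)))
termination_by l.length
decreasing_by
  · simp only [List.length_take]; omega
  · simp only [List.length_drop]; omega

-- B: pairs = [(x[i], y[i]) for i in range(len(x))]; merge-sort them; project both outputs.
def sort_2_list_alt (x_list : List Int) (y_list : List Int) : List Int × List Int :=
  let pairs := (PySem.List.pyRange 0 (x_list.length : Int) 1).map
    (fun i => (PySem.List.pyGetD x_list i 0, PySem.List.pyGetD y_list i 0))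
  let s := pvMsort pairs
  (s.map Prod.fst, s.map Prod.snd)

-- ===== PRECONDITION & SPEC =====
-- Python A (and B) raises IndexError iff y_list is shorter than x_list; exactly those inputs are excluded.
def Pre_sort_2_list (x_list : List Int) (y_list : List Int) : Prop :=
  x_list.length ≤ y_list.length
instance (x_list : List Int) (y_list : List Int) : Decidable (Pre_sort_2_list x_list y_list) := by unfold Pre_sort_2_list; infer_instance

def pvWitness_sort_2_list : List Int × List Int := ([3, 1, 2], [7, 8, 9])

def Spec_sort_2_list (x_list : List Int) (y_list : List Int) (out : List Int × List Int) : Prop := out = sort_2_list_alt x_list y_list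
instance (x_list : List Int) (y_list : List Int) (out : List Int × List Int) : Decidable (Spec_sort_2_list x_list y_list out) := by unfold Spec_sort_2_list; infer_instance

-- ===== CLAIM (what is proved, stated in full; the proofs are below) =====
def Claim_equal_sort_2_list : Prop := ∀ (x_list : List Int) (y_list : List Int), Dom_sort_2_list x_list y_list → Pre_sort_2_list x_list y_list → Spec_sort_2_list x_list y_list (sort_2_list x_list y_list)

-- ===== LEMMAS AND PROOFS =====

-- the (total, antisymmetric) lexicographic ≤ both sorts produce
def pvLexLe (p q : Int × Int) : Prop := p.1 < q.1 ∨ (p.1 = q.1 ∧ p.2 ≤ q.2)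

-- the comparison sorted2 (port A's temp.sort()) uses on fst/snd keys
def pvBef (p q : Int × Int) : Bool :=
  decide (p.1 < q.1) || (!decide (q.1 < p.1) && decide (p.2 < q.2))

theorem pvLexLe_trans {p q r : Int × Int} (h1 : pvLexLe p q) (h2 : pvLexLe q r) : pvLexLe p r := by
  unfold pvLexLe at *; omega

theorem pvPairLt_le {p q : Int × Int} (h : pvPairLt p q = true) : pvLexLe p q := by
  simp [pvPairLt] at h; unfold pvLexLe; omega

theorem pvPairLt_false_le {p q : Int × Int} (h : pvPairLt p q = false) : pvLexLe q p := by
  simp [pvPairLt] at h; unfold pvLexLe; omega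

theorem pvBef_le {p q : Int × Int} (h : pvBef p q = true) : pvLexLe p q := by
  simp [pvBef] at h; unfold pvLexLe; omega

theorem pvBef_false_le {p q : Int × Int} (h : pvBef p q = false) : pvLexLe q p := by
  simp [pvBef] at h; unfold pvLexLe; omega

theorem pvMerge_perm : ∀ (a b : List (Int × Int)), (pvMerge a b).Perm (a ++ b) := by
  intro a b
  fun_induction pvMerge a b with
  | case1 b => simp
  | case2 a h => simp
  | case3 x xs y ys h ih =>
      simpa [pvMerge, h] using (ih.cons y).trans List.perm_middle.symm
  | case4 x xs y ys h ih =>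
      simpa [pvMerge, h] using ih.cons x

theorem pvMerge_pairwise : ∀ (a b : List (Int × Int)),
    a.Pairwise pvLexLe → b.Pairwise pvLexLe → (pvMerge a b).Pairwise pvLexLe := by
  intro a b ha hb
  fun_induction pvMerge a b with
  | case1 b => simpa [pvMerge] using hb
  | case2 a h => simpa [pvMerge] using ha
  | case3 x xs y ys h ih =>
      have hyb := List.pairwise_cons.mp hb
      refine List.pairwise_cons.mpr ⟨?_, ih ha hyb.2⟩
      intro z hz
      have hz' : z ∈ (x :: xs) ++ ys := (pvMerge_perm (x :: xs) ys).subset hz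
      have hyx : pvLexLe y x := pvPairLt_le h
      rcases List.mem_append.mp hz' with hz1 | hz2
      · rcases hz1 with _ | hz1
        · exact hyx
        · exact pvLexLe_trans hyx ((List.pairwise_cons.mp ha).1 z (by assumption))
      · exact hyb.1 z hz2
  | case4 x xs y ys h ih =>
      have hxa := List.pairwise_cons.mp ha
      refine List.pairwise_cons.mpr ⟨?_, ih hxa.2 hb⟩
      intro z hz
      have hz' : z ∈ xs ++ (y :: ys) := (pvMerge_perm xs (y :: ys)).subset hz
      rcases List.mem_append.mp hz' with hz1 | hz2
      · exact hxa.1 z hz1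
      · have hxy : pvLexLe x y := pvPairLt_false_le (by simpa using h)
        rcases hz2 with _ | hz2
        · exact hxy
        · exact pvLexLe_trans hxy ((List.pairwise_cons.mp hb).1 z (by assumption))

theorem pvMsort_perm (l : List (Int × Int)) : (pvMsort l).Perm l := by
  fun_induction pvMsort l with
  | case1 l h => exact List.Perm.refl l
  | case2 l h ih1 ih2 =>
      exact (pvMerge_perm _ _).trans ((ih1.append ih2).trans
        (by rw [List.take_append_drop]))

theorem pvMsort_pairwise (l : List (Int × Int)) : (pvMsort l).Pairwise pvLexLe := by
  fun_induction pvMsort l with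
  | case1 l h =>
      match l, h with
      | [], _ => exact List.Pairwise.nil
      | [a], _ => simp
  | case2 l h ih1 ih2 => exact pvMerge_pairwise _ _ ih1 ih2

theorem insertBy_pvBef_pairwise (x : Int × Int) :
    ∀ (acc : List (Int × Int)), acc.Pairwise pvLexLe →
      (PySem.List.insertBy pvBef x acc).Pairwise pvLexLe := by
  intro acc h
  induction acc with
  | nil => simp [PySem.List.insertBy]
  | cons y ys ih =>
      have hy := List.pairwise_cons.mp h
      by_cases hb : pvBef x y = true
      · simp only [PySem.List.insertBy, hb, if_true]
        refine List.pairwise_cons.mpr ⟨?_, h⟩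
        intro z hz
        rcases hz with _ | hz
        · exact pvBef_le hb
        · exact pvLexLe_trans (pvBef_le hb) (hy.1 z (by assumption))
      · simp only [PySem.List.insertBy, hb]
        refine List.pairwise_cons.mpr ⟨?_, ih hy.2⟩
        intro z hz
        rcases (PySem.List.mem_insertBy pvBef x z ys).mp hz with hz1 | hz2
        · exact hz1 ▸ pvBef_false_le (by simpa using hb)
        · exact hy.1 z hz2

theorem foldl_insertBy_pairwise (l : List (Int × Int)) :
    ∀ (acc : List (Int × Int)), acc.Pairwise pvLexLe →
      (l.foldl (fun acc x => PySem.List.insertBy pvBef x acc) acc).Pairwise pvLexLe := by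
  induction l with
  | nil => intro acc h; exact h
  | cons x t ih => intro acc h; exact ih _ (insertBy_pvBef_pairwise x acc h)

theorem sorted2_eq_foldl (l : List (Int × Int)) :
    PySem.List.sorted2 l Prod.fst Prod.snd
      = l.foldl (fun acc x => PySem.List.insertBy pvBef x acc) [] := rfl

theorem sorted2_pairwise_lex (l : List (Int × Int)) :
    (PySem.List.sorted2 l Prod.fst Prod.snd).Pairwise pvLexLe := by
  rw [sorted2_eq_foldl]
  exact foldl_insertBy_pairwise l [] List.Pairwise.nil

-- the heart: both sorts of the same pair list are sorted permutations of it
-- under the total antisymmetric lexicographic order, hence equal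
theorem sorted2_eq_pvMsort (l : List (Int × Int)) :
    PySem.List.sorted2 l Prod.fst Prod.snd = pvMsort l := by
  refine List.Perm.eq_of_pairwise ?_ (sorted2_pairwise_lex l) (pvMsort_pairwise l)
    ((PySem.List.sorted2_perm l Prod.fst Prod.snd false).trans (pvMsort_perm l).symm)
  intro a b _ _ h1 h2
  obtain ⟨a1, a2⟩ := a; obtain ⟨b1, b2⟩ := b
  unfold pvLexLe at h1 h2
  simp only [Prod.mk.injEq]
  omega

theorem sort_2_list_spec : Claim_equal_sort_2_list := by
  intro x_list y_list _ _
  unfold Spec_sort_2_list sort_2_list sort_2_list_alt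
  simp only [PySem.List.foldl_append_singleton_eq_map, List.nil_append]
  rw [PySem.List.foldl_prod_mk (f := fun acc (pos : Int × Int) => acc ++ [pos.1])
        (g := fun acc (pos : Int × Int) => acc ++ [pos.2]),
      PySem.List.foldl_append_singleton_eq_map, PySem.List.foldl_append_singleton_eq_map,
      sorted2_eq_pvMsort]
  simp
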